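-- pv_equiv track=rewrite | github.com/quantumlib/Cirq | cirq/docs/snippets_test.py | find_expected_outputs
-- ===== SOURCE A (Python) =====
-- from typing import List, Dict
--
-- def find_expected_outputs(snippet: str) -> List[str]:
--     """Finds expected output lines within a snippet.
--
--     Expected output must be annotated with a leading '# prints'.
--     Lines below '# prints' must start with '# ' or be just '#' and not indent
--     any more than that in order to add an expected line. As soon as a line
--     breaks this pattern, expected output recording cuts off.
--
--     Adding words after '# prints' causes the expected output lines to be
--     skipped instead of included. For example, for random output say
--     '# prints something like' to avoid checking the following lines.
--     """
--     start_key = '# prints'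
--     continue_key = '# '
--     expected = []
--
--     printing = False
--     for line in snippet.split('\n'):
--         if printing:
--             if line.startswith(continue_key) or line == continue_key.strip():
--                 rest = line[len(continue_key):]
--                 expected.append(rest)
--             else:
--                 printing = False
--         elif line.startswith(start_key):
--             rest = line[len(start_key):]
--             if not rest.strip():
--                 printing = True
--
--     return expected
-- ===== SOURCE B (Python) =====
-- def find_expected_outputs(snippet: str):
--     """Two-stage algorithm: (1) partition the lines into maximal runs of
--     comment-continuation lines ('# ...' or '#'); (2) since a '# prints'
--     marker is itself a continuation line, the collected lines of each run
--     are exactly the lines after the run's FIRST marker, so emit those."""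
--     def is_cont(line):
--         return line.startswith('# ') or line == '#'
--
--     def is_marker(line):
--         return line.startswith('# prints') and not line[8:].strip()
--
--     # stage 1: maximal runs of continuation lines
--     runs, cur = [], []
--     for line in snippet.split('\n'):
--         if is_cont(line):
--             cur.append(line)
--         elif cur:
--             runs.append(cur)
--             cur = []
--     if cur:
--         runs.append(cur)
--
--     # stage 2: per run, everything after the first marker
--     out = []
--     for run in runs:
--         for i, line in enumerate(run):
--             if is_marker(line):
--                 out.extend(l[2:] for l in run[i + 1:])
--                 break
--     return out
-- ===== Notes on version B (the rewrite author's own statement) =====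
-- stated objective: alternative
-- what changed: B is a two-stage algorithm: it first partitions the lines into maximal runs of comment-continuation lines, then, per run, emits the lines after the run's first annotation marker; A instead threads a boolean state flag through a single pass over the lines.
import Mathlib
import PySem

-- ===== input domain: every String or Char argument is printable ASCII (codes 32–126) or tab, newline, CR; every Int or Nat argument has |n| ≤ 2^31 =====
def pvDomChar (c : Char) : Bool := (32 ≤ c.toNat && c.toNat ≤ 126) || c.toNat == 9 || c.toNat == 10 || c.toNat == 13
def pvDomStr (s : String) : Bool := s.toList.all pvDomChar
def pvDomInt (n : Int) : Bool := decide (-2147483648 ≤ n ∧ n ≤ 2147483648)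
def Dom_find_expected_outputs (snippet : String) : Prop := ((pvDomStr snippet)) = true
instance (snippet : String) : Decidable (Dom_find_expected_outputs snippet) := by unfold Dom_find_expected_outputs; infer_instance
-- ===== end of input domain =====

-- B replaces A's flag-driven single pass by a two-stage algorithm: partition the
-- lines into maximal runs of continuation lines, then per run emit the lines
-- after the run's first '# prints' marker (same output, different decomposition).

-- ===== PORT A =====
-- snippet.split("\n"): split? is some here since the separator "\n" is nonempty; .getD [] is exact
-- A's loop body: state = (expected, printing)
def feStepA (st : List String × Bool) (line : String) : List String × Bool :=
  if st.2 then
    if PySem.Str.startswith line "# " || line == PySem.Str.strip "# " then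
      (st.1 ++ [PySem.Str.slice line (some 2) none], st.2)
    else
      (st.1, false)
  else if PySem.Str.startswith line "# prints" then
    if PySem.Str.strip (PySem.Str.slice line (some 8) none) == "" then
      (st.1, true)
    else
      (st.1, st.2)
  else
    (st.1, st.2)

def find_expected_outputs (snippet : String) : List String :=
  (((PySem.Str.split? snippet "\n").getD []).foldl feStepA ([], false)).1

-- ===== PORT B =====
-- Source B's is_cont / is_marker helpers
def feIsCont (line : String) : Bool :=
  PySem.Str.startswith line "# " || line == "#"

def feIsMarker (line : String) : Bool :=
  PySem.Str.startswith line "# prints"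
    && PySem.Str.strip (PySem.Str.slice line (some 8) none) == ""

-- stage-1 loop body of Source B: state = (runs, cur)
def feRunsStep (st : List (List String) × List String) (line : String) :
    List (List String) × List String :=
  if feIsCont line then (st.1, st.2 ++ [line])
  else if st.2.isEmpty then st
  else (st.1 ++ [st.2], [])

-- stage 1: the loop plus the trailing 'if cur: runs.append(cur)'
def feRuns (lines : List String) : List (List String) :=
  if (lines.foldl feRunsStep ([], [])).2.isEmpty then (lines.foldl feRunsStep ([], [])).1
  else (lines.foldl feRunsStep ([], [])).1 ++ [(lines.foldl feRunsStep ([], [])).2]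

-- stage 2 inner loop of Source B: first marker, then run[i+1:] with l[2:] mapped
def feEmit : List String → List String
  | [] => []
  | l :: rest =>
    if feIsMarker l then rest.map (fun x => PySem.Str.slice x (some 2) none)
    else feEmit rest

def find_expected_outputs_alt (snippet : String) : List String :=
  (feRuns ((PySem.Str.split? snippet "\n").getD [])).flatMap feEmit

-- ===== PRECONDITION & SPEC =====
def Spec_find_expected_outputs (snippet : String) (out : List String) : Prop := out = find_expected_outputs_alt snippet
instance (snippet : String) (out : List String) : Decidable (Spec_find_expected_outputs snippet out) := by unfold Spec_find_expected_outputs; infer_instance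

-- ===== CLAIM (what is proved, stated in full; the proofs are below) =====
def Claim_equal_find_expected_outputs : Prop := ∀ (snippet : String), Dom_find_expected_outputs snippet → Spec_find_expected_outputs snippet (find_expected_outputs snippet)

-- ===== LEMMAS AND PROOFS =====

-- a line starting with the start key also starts with the continue key
theorem startswith_prints_imp_cont (l : String)
    (h : PySem.Str.startswith l "# prints" = true) :
    PySem.Str.startswith l "# " = true := by
  simp only [PySem.Str.startswith_eq, PySem.Chars.startswith_iff] at h ⊢
  exact List.IsPrefix.trans (by decide) h

theorem strip_cont_key : PySem.Str.strip "# " = "#" := by decide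

theorem marker_imp_cont (l : String) (h : feIsMarker l = true) :
    feIsCont l = true := by
  simp only [feIsMarker, Bool.and_eq_true] at h
  simp only [feIsCont, startswith_prints_imp_cont l h.1, Bool.true_or]

-- proof-only recursive form of stage 1: runsRec cur ls = runs still to be produced
def runsRec : List String → List String → List (List String)
  | cur, [] => if cur.isEmpty then [] else [cur]
  | cur, l :: ls =>
    if feIsCont l then runsRec (cur ++ [l]) ls
    else if cur.isEmpty then runsRec [] ls
    else cur :: runsRec [] ls

-- case equations for A's step function, phrased with B's predicates
theorem feStepA_true (acc : List String) (l : String) :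
    feStepA (acc, true) l
      = if feIsCont l then (acc ++ [PySem.Str.slice l (some 2) none], true)
        else (acc, false) := by
  show (if (PySem.Str.startswith l "# " || l == PySem.Str.strip "# ") = true
      then (acc ++ [PySem.Str.slice l (some 2) none], true) else (acc, false)) = _
  rw [strip_cont_key]
  rfl

theorem feStepA_false (acc : List String) (l : String) :
    feStepA (acc, false) l = if feIsMarker l then (acc, true) else (acc, false) := by
  show (if PySem.Str.startswith l "# prints" = true
      then (if (PySem.Str.strip (PySem.Str.slice l (some 8) none) == "") = true
            then (acc, true) else (acc, false))
      else (acc, false)) = _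
  unfold feIsMarker
  by_cases h1 : PySem.Str.startswith l "# prints" = true
  · by_cases h2 : (PySem.Str.strip (PySem.Str.slice l (some 8) none) == "") = true
    · rw [if_pos h1, if_pos h2, if_pos (by rw [h1, h2]; rfl)]
    · rw [if_pos h1, if_neg h2, if_neg (by simp only [Bool.and_eq_true]; exact fun h => h2 h.2)]
  · rw [if_neg h1, if_neg (by simp only [Bool.and_eq_true]; exact fun h => h1 h.1)]

-- feRunsStep on an explicit pair, spelled out (definitional)
theorem feRunsStep_eq (runs : List (List String)) (cur : List String) (line : String) :
    feRunsStep (runs, cur) line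
      = if feIsCont line then (runs, cur ++ [line])
        else if cur.isEmpty then (runs, cur) else (runs ++ [cur], []) := rfl

-- the stage-1 fold computes runsRec
theorem feRuns_eq_runsRec :
    ∀ (ls : List String) (runs : List (List String)) (cur : List String),
      (if (ls.foldl feRunsStep (runs, cur)).2.isEmpty then (ls.foldl feRunsStep (runs, cur)).1
        else (ls.foldl feRunsStep (runs, cur)).1 ++ [(ls.foldl feRunsStep (runs, cur)).2])
        = runs ++ runsRec cur ls := by
  intro ls
  induction ls with
  | nil =>
    intro runs cur
    simp only [List.foldl_nil, runsRec]
    by_cases h : cur.isEmpty <;> simp [h]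
  | cons l ls ih =>
    intro runs cur
    rw [List.foldl_cons, feRunsStep_eq]
    by_cases hc : feIsCont l = true
    · rw [if_pos hc,
        show runsRec cur (l :: ls) = runsRec (cur ++ [l]) ls by simp [runsRec, hc]]
      exact ih runs (cur ++ [l])
    · rw [if_neg hc]
      by_cases he : cur.isEmpty = true
      · have hce := List.isEmpty_iff.mp he
        subst hce
        rw [if_pos he,
          show runsRec [] (l :: ls) = runsRec [] ls by simp [runsRec, hc]]
        exact ih runs []
      · rw [if_neg he,
          show runsRec cur (l :: ls) = cur :: runsRec [] ls by simp [runsRec, hc, he]]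
        rw [ih (runs ++ [cur]) []]
        simp

-- a nonempty current run absorbs the continuation prefix, then a fresh run starts
theorem runsRec_cons_run :
    ∀ (ls : List String) (cur : List String), cur ≠ [] →
      runsRec cur ls
        = (cur ++ ls.takeWhile feIsCont) :: runsRec [] (ls.dropWhile feIsCont) := by
  intro ls
  induction ls with
  | nil =>
    intro cur hne
    simp [runsRec, List.isEmpty_iff, hne]
  | cons l ls ih =>
    intro cur hne
    by_cases hc : feIsCont l = true
    · rw [show runsRec cur (l :: ls) = runsRec (cur ++ [l]) ls by
        simp [runsRec, hc]]
      rw [ih (cur ++ [l]) (by simp)]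
      simp [List.takeWhile, List.dropWhile, hc]
    · rw [show runsRec cur (l :: ls) = cur :: runsRec [] (l :: ls) by
        simp [runsRec, hc, List.isEmpty_iff, hne]]
      simp [List.takeWhile_cons_of_neg (by simpa using hc),
        List.dropWhile_cons_of_neg (by simpa using hc)]

-- decomposition of the emitted output from a fresh run state
theorem flatMap_runsRec_nil (ls : List String) :
    (runsRec [] ls).flatMap feEmit
      = feEmit (ls.takeWhile feIsCont)
        ++ (runsRec [] (ls.dropWhile feIsCont)).flatMap feEmit := by
  cases ls with
  | nil => simp [runsRec, feEmit]
  | cons l ls =>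
    by_cases hc : feIsCont l = true
    · rw [show runsRec [] (l :: ls) = runsRec [l] ls by simp [runsRec, hc]]
      rw [runsRec_cons_run ls [l] (by simp)]
      simp [List.takeWhile, List.dropWhile, hc]
    · rw [List.takeWhile_cons_of_neg (by simpa using hc),
        List.dropWhile_cons_of_neg (by simpa using hc)]
      rw [show runsRec [] (l :: ls) = runsRec [] ls by simp [runsRec, hc]]
      simp [feEmit]

-- B's remaining output given A's flag
def feRest (printing : Bool) (ls : List String) : List String :=
  if printing then
    (ls.takeWhile feIsCont).map (fun x => PySem.Str.slice x (some 2) none)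
      ++ (runsRec [] (ls.dropWhile feIsCont)).flatMap feEmit
  else
    (runsRec [] ls).flatMap feEmit

-- joint invariant: A's fold appends exactly B's remaining output
theorem fe_invariant :
    ∀ (ls : List String) (acc : List String) (printing : Bool),
      (ls.foldl feStepA (acc, printing)).1 = acc ++ feRest printing ls := by
  intro ls
  induction ls with
  | nil =>
    intro acc printing
    cases printing <;> simp [feRest, runsRec, List.flatMap]
  | cons l ls ih =>
    intro acc printing
    cases printing with
    | true =>
      rw [List.foldl_cons, feStepA_true]
      by_cases hc : feIsCont l = true
      · rw [if_pos hc, ih _ true]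
        simp [feRest, List.takeWhile, List.dropWhile, hc]
      · rw [if_neg hc, ih _ false]
        have h1 : feRest true (l :: ls) = feRest false (l :: ls) := by
          simp only [feRest, List.takeWhile_cons_of_neg (by simpa using hc),
            List.dropWhile_cons_of_neg (by simpa using hc), if_true]
          simp
        rw [h1]
        simp only [feRest, if_neg Bool.false_ne_true]
        rw [show runsRec [] (l :: ls) = runsRec [] ls by simp [runsRec, hc]]
    | false =>
      rw [List.foldl_cons, feStepA_false]
      by_cases hm : feIsMarker l = true
      · have hc := marker_imp_cont l hm
        rw [if_pos hm, ih _ true]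
        have h1 : feRest false (l :: ls) = feRest true ls := by
          simp only [feRest, if_neg Bool.false_ne_true, if_pos]
          rw [show runsRec [] (l :: ls) = runsRec [l] ls by simp [runsRec, hc]]
          rw [runsRec_cons_run ls [l] (by simp)]
          simp [feEmit, hm]
        rw [h1]
      · rw [if_neg hm, ih _ false]
        by_cases hc : feIsCont l = true
        · have h1 : feRest false (l :: ls) = feRest false ls := by
            simp only [feRest, if_neg Bool.false_ne_true]
            rw [show runsRec [] (l :: ls) = runsRec [l] ls by simp [runsRec, hc]]
            rw [runsRec_cons_run ls [l] (by simp)]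
            rw [flatMap_runsRec_nil ls]
            have h2 : feEmit (l :: ls.takeWhile feIsCont)
                = feEmit (ls.takeWhile feIsCont) := by
              simp [feEmit, hm]
            simp [h2]
          rw [h1]
        · have h1 : feRest false (l :: ls) = feRest false ls := by
            simp only [feRest, if_neg Bool.false_ne_true]
            rw [show runsRec [] (l :: ls) = runsRec [] ls by simp [runsRec, hc]]
          rw [h1]

-- ===== VERDICT (by name: the statement is the Claim_ definition above) =====
theorem find_expected_outputs_spec : Claim_equal_find_expected_outputs := by
  intro snippet _
  show find_expected_outputs snippet = find_expected_outputs_alt snippet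
  unfold find_expected_outputs find_expected_outputs_alt feRuns
  rw [fe_invariant _ [] false, feRuns_eq_runsRec _ [] []]
  simp [feRest]
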